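-- pv_equiv track=rewrite | github.com/pypi-data/pypi-mirror-383 | packages/neosqlite/neosqlite-1.2.2.tar.gz/neosqlite-1.2.2/neosqlite/collection/query_helper.py | _find_parent_unwind
-- ===== SOURCE A (Python) =====
-- from typing import Any, Dict, List, Union
--
-- def _find_parent_unwind(
--     field_name: str, unwound_fields: Dict[str, str]
-- ) -> tuple[str | None, str | None]:
--     """
--     Find the parent unwind field for a nested unwind.
--
--     This method searches through already processed unwind fields to find a
--     parent field that the current field is nested within. This is used to
--     properly construct SQL joins for nested array unwinding operations.
--
--     Args:
--         field_name (str): The field name to find the parent for.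
--         unwound_fields (Dict[str, str]): A dictionary mapping field paths to
--                                          their aliases.
--
--     Returns:
--         tuple[str | None, str | None]: A tuple containing the parent field
--                                        name and its alias, or (None, None)
--                                        if no parent is found.
--     """
--     parent_field = None
--     parent_alias = None
--     longest_match_len = -1
--
--     for p_field, p_alias in unwound_fields.items():
--         prefix = p_field + "."
--         if field_name.startswith(prefix):
--             if len(p_field) > longest_match_len:
--                 longest_match_len = len(p_field)
--                 parent_field = p_field
--                 parent_alias = p_alias
--     return parent_field, parent_alias
-- ===== SOURCE B (Python) =====
-- def _find_parent_unwind(field_name, unwound_fields):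
--     # Walk field_name's dot boundaries from the rightmost (longest prefix) to
--     # the leftmost; the first dot-prefix that is a key of unwound_fields is the
--     # longest parent, so return it immediately.
--     for i in reversed(range(len(field_name))):
--         if field_name[i] == '.':
--             parent = field_name[:i]
--             alias = unwound_fields.get(parent)
--             if alias is not None:
--                 return parent, alias
--     return None, None
-- ===== Notes on version B (the rewrite author's own statement) =====
-- stated objective: alternative
-- what changed: Instead of scanning every dict entry and testing it as a dotted prefix of field_name, B enumerates field_name's dot-boundary prefixes longest-first and does one dict lookup per position, returning at the first hit.
import Mathlib
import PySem

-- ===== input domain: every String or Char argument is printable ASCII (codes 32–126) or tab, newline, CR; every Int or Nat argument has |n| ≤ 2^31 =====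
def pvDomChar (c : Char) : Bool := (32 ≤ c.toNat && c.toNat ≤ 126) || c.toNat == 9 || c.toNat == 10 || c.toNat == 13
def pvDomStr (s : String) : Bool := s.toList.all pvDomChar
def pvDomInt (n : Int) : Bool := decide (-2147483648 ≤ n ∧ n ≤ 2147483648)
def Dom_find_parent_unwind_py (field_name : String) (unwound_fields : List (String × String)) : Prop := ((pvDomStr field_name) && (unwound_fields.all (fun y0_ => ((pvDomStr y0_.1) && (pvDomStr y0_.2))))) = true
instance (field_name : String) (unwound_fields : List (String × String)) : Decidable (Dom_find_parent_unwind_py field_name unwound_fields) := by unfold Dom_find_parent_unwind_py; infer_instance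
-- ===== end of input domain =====

-- B replaces A's scan of every dict entry by enumerating field_name's dot
-- boundaries longest-first with one dict lookup each (objective: alternative).

-- ===== PORT A =====
-- A's loop over unwound_fields.items(): keep (parent_field, parent_alias,
-- longest_match_len), update when p_field + "." is a prefix of field_name and
-- strictly longer than the best so far.
def find_parent_unwind_py (field_name : String) (unwound_fields : List (String × String)) : Option String × Option String :=
  let st := unwound_fields.foldl
    (fun (acc : Option String × Option String × Int) kv =>
      if PySem.Str.startswith field_name (kv.1 ++ ".") then
        if (PySem.Str.len kv.1 : Int) > acc.2.2 then
          (some kv.1, some kv.2, (PySem.Str.len kv.1 : Int))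
        else acc
      else acc)
    (none, none, -1)
  (st.1, st.2.1)

-- ===== PORT B =====
-- B's loop: for i in reversed(range(len(field_name))): if field_name[i] == '.',
-- look up field_name[:i] in the dict (first match); the first hit is returned.
def bScan (field_name : String) (unwound_fields : List (String × String)) : List Int → Option String × Option String
  | [] => (none, none)
  | i :: is =>
    if PySem.Str.pyGet? field_name i == some '.' then
      let parent := PySem.Str.slice field_name none (some i)
      match unwound_fields.lookup parent with
      | some v => (some parent, some v)
      | none => bScan field_name unwound_fields is
    else bScan field_name unwound_fields is

def find_parent_unwind_py_alt (field_name : String) (unwound_fields : List (String × String)) : Option String × Option String :=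
  bScan field_name unwound_fields (PySem.List.pyRange 0 (PySem.Str.len field_name) 1).reverse

-- ===== PRECONDITION & SPEC =====
def Spec_find_parent_unwind_py (field_name : String) (unwound_fields : List (String × String)) (out : Option String × Option String) : Prop := out = find_parent_unwind_py_alt field_name unwound_fields
instance (field_name : String) (unwound_fields : List (String × String)) (out : Option String × Option String) : Decidable (Spec_find_parent_unwind_py field_name unwound_fields out) := by unfold Spec_find_parent_unwind_py; infer_instance

-- ===== CLAIM (what is proved, stated in full; the proofs are below) =====
def Claim_equal_find_parent_unwind_py : Prop := ∀ (field_name : String) (unwound_fields : List (String × String)), Dom_find_parent_unwind_py field_name unwound_fields → Spec_find_parent_unwind_py field_name unwound_fields (find_parent_unwind_py field_name unwound_fields)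

-- ===== LEMMAS AND PROOFS =====

-- A's loop body with its two tests merged into one conjunction.
def aStep (f : String) (acc : Option String × Option String × Int) (kv : String × String) : Option String × Option String × Int :=
  if (kv.1.toList ++ ['.']).isPrefixOf f.toList ∧ acc.2.2 < (kv.1.length : Int) then
    (some kv.1, some kv.2, (kv.1.length : Int))
  else acc

-- Proof-side reshaping of A's fold: the first entry whose key k satisfies
-- "k + '.' is a prefix of f" with length beyond m; later strictly longer
-- matches override it.
def pickA (f : String) (m : Int) : List (String × String) → Option (String × String)
  | [] => none
  | (k, v) :: t =>
    if (k.toList ++ ['.']).isPrefixOf f.toList ∧ m < (k.length : Int) then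
      some ((pickA f (k.length : Int) t).getD (k, v))
    else pickA f m t

theorem startswith_dot (f k : String) :
    PySem.Str.startswith f (k ++ ".") = (k.toList ++ ['.']).isPrefixOf f.toList := by
  rw [PySem.Str.startswith_eq]
  rw [show (k ++ ".").toList = k.toList ++ ['.'] from by rw [String.toList_append]; rfl]
  by_cases h : k.toList ++ ['.'] <+: f.toList
  · rw [(PySem.Chars.startswith_iff _ _).mpr h, (List.isPrefixOf_iff_prefix).mpr h]
  · rw [Bool.eq_iff_iff]
    simp [PySem.Chars.startswith_iff, List.isPrefixOf_iff_prefix, h]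

theorem step_eq (f : String) :
    (fun (acc : Option String × Option String × Int) (kv : String × String) =>
      if PySem.Str.startswith f (kv.1 ++ ".") then
        if (PySem.Str.len kv.1 : Int) > acc.2.2 then
          (some kv.1, some kv.2, (PySem.Str.len kv.1 : Int))
        else acc
      else acc) = aStep f := by
  funext acc kv
  have h1 : PySem.Str.len kv.1 = (kv.1.length : Int) := by simp [PySem.Str.len_eq]
  rw [startswith_dot, h1]
  by_cases hp : (kv.1.toList ++ ['.']).isPrefixOf f.toList
  · by_cases hm : acc.2.2 < (kv.1.length : Int)
    · simp [aStep, hp, hm]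
    · simp [aStep, hp, hm]
  · simp [aStep, hp]

theorem lookup_mem {a v : String} {l : List (String × String)}
    (h : List.lookup a l = some v) : (a, v) ∈ l := by
  induction l with
  | nil => simp [List.lookup] at h
  | cons p t ih =>
    obtain ⟨k, w⟩ := p
    by_cases hk : k = a
    · subst hk; simp [List.lookup] at h; simp [h]
    · have hba : (a == k) = false := by simp [Ne.symm hk]
      simp only [List.lookup, hba] at h
      exact List.mem_cons_of_mem _ (ih h)

theorem lookup_cons_ne {a k w : String} {t : List (String × String)} (hk : ¬ k = a) :
    List.lookup a ((k, w) :: t) = List.lookup a t := by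
  have hba : (a == k) = false := by simp [Ne.symm hk]
  simp only [List.lookup, hba]

theorem lookup_cons_self {a w : String} {t : List (String × String)} :
    List.lookup a ((a, w) :: t) = some w := by
  simp [List.lookup]

-- A's fold computes pickA.
theorem foldA_eq (f : String) (t : List (String × String)) :
    ∀ (pf pa : Option String) (m : Int),
    t.foldl (aStep f) (pf, pa, m)
    = (match pickA f m t with
       | none => (pf, pa, m)
       | some (k, v) => (some k, some v, (k.length : Int))) := by
  induction t with
  | nil => intro pf pa m; simp [pickA]
  | cons kv t ih =>
    intro pf pa m
    obtain ⟨k, v⟩ := kv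
    rw [List.foldl_cons]
    by_cases hc : ((k.toList ++ ['.']).isPrefixOf f.toList : Prop) ∧ m < (k.length : Int)
    · have hstep : aStep f (pf, pa, m) (k, v) = (some k, some v, (k.length : Int)) := by
        simp [aStep, hc.1, hc.2]
      rw [hstep, ih, pickA, if_pos hc]
      cases hrec : pickA f (k.length : Int) t with
      | none => simp
      | some kv' => obtain ⟨k', v'⟩ := kv'; simp
    · have hstep : aStep f (pf, pa, m) (k, v) = (pf, pa, m) := by
        simp only [aStep]
        rw [if_neg]
        exact fun hcc => hc ⟨hcc.1, hcc.2⟩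
      rw [hstep, ih, pickA, if_neg hc]

theorem pickA_none {f : String} {m : Int} {l : List (String × String)}
    (h : pickA f m l = none) :
    ∀ kv ∈ l, (kv.1.toList ++ ['.']).isPrefixOf f.toList → ((kv.1.length : Nat) : Int) ≤ m := by
  induction l generalizing m with
  | nil => intro kv hkv; simp at hkv
  | cons p t ih =>
    obtain ⟨k, v⟩ := p
    intro kv hkv hpre
    rw [pickA] at h
    by_cases hc : ((k.toList ++ ['.']).isPrefixOf f.toList : Prop) ∧ m < (k.length : Int)
    · rw [if_pos hc] at h; exact absurd h (by simp)
    · rw [if_neg hc] at h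
      rcases List.mem_cons.mp hkv with hkv | hkv
      · subst hkv
        exact le_of_not_gt fun hlt => hc ⟨hpre, hlt⟩
      · exact ih h kv hkv hpre

theorem pickA_some {f : String} {m : Int} {l : List (String × String)} {k v : String}
    (h : pickA f m l = some (k, v)) :
    ((k.toList ++ ['.']).isPrefixOf f.toList = true) ∧ m < (k.length : Int) ∧
    (∀ kv ∈ l, (kv.1.toList ++ ['.']).isPrefixOf f.toList → kv.1.length ≤ k.length) ∧
    List.lookup k l = some v := by
  induction l generalizing m with
  | nil => simp [pickA] at h
  | cons p t ih =>
    obtain ⟨k0, v0⟩ := p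
    rw [pickA] at h
    by_cases hc : ((k0.toList ++ ['.']).isPrefixOf f.toList : Prop) ∧ m < (k0.length : Int)
    · rw [if_pos hc] at h
      have h' := Option.some.inj h
      cases hrec : pickA f (k0.length : Int) t with
      | none =>
        rw [hrec] at h'
        simp only [Option.getD_none] at h'
        obtain ⟨hk, hv⟩ := Prod.mk.inj h'
        subst hk; subst hv
        refine ⟨hc.1, hc.2, ?_, lookup_cons_self⟩
        intro kv hkv hpre
        rcases List.mem_cons.mp hkv with h1 | h1
        · subst h1; exact le_refl _
        · have := pickA_none hrec kv h1 hpre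
          exact_mod_cast this
      | some kv' =>
        obtain ⟨k1, v1⟩ := kv'
        rw [hrec] at h'
        simp only [Option.getD_some] at h'
        obtain ⟨hk, hv⟩ := Prod.mk.inj h'
        rw [hk, hv] at hrec
        obtain ⟨hpre1, hm1, hbound, hlook⟩ := ih hrec
        refine ⟨hpre1, lt_trans hc.2 hm1, ?_, ?_⟩
        · intro kv hkv hpre
          rcases List.mem_cons.mp hkv with h1 | h1
          · rw [h1]
            show k0.length ≤ k.length
            exact le_of_lt (by exact_mod_cast hm1)
          · exact hbound kv h1 hpre
        · have hne : ¬ k0 = k := fun he => absurd hm1 (by rw [he]; exact lt_irrefl _)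
          rw [lookup_cons_ne hne]; exact hlook
    · rw [if_neg hc] at h
      obtain ⟨hpre1, hm1, hbound, hlook⟩ := ih h
      refine ⟨hpre1, hm1, ?_, ?_⟩
      · intro kv hkv hpre
        rcases List.mem_cons.mp hkv with h1 | h1
        · rw [h1]
          show k0.length ≤ k.length
          have hpre0 : (k0.toList ++ ['.']).isPrefixOf f.toList = true := by
            rw [h1] at hpre; exact hpre
          have h2 : ((k0.length : Nat) : Int) ≤ m :=
            le_of_not_gt fun hlt => hc ⟨hpre0, hlt⟩
          exact le_of_lt (by exact_mod_cast lt_of_le_of_lt h2 hm1)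
        · exact hbound kv h1 hpre
      · have hne : ¬ k0 = k := by
          intro he; subst he
          exact hc ⟨hpre1, hm1⟩
        rw [lookup_cons_ne hne]; exact hlook

theorem matches_iff (f k : String) :
    ((k.toList ++ ['.']).isPrefixOf f.toList = true) ↔
    (f.toList.take k.length = k.toList ∧ f.toList[k.length]? = some '.') := by
  rw [List.isPrefixOf_iff_prefix]
  constructor
  · rintro ⟨t, ht⟩
    have hf : f.toList = k.toList ++ ('.' :: t) := by rw [← ht]; simp
    have hlen : k.toList.length = k.length := String.length_toList
    constructor
    · rw [hf, ← hlen, List.take_left]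
    · rw [hf, ← hlen, List.getElem?_append_right (le_refl _)]
      simp
  · rintro ⟨htake, hget⟩
    obtain ⟨h1, h2⟩ := List.getElem?_eq_some_iff.mp hget
    refine ⟨f.toList.drop (k.length + 1), ?_⟩
    have hdrop : f.toList.drop k.length = '.' :: f.toList.drop (k.length + 1) := by
      rw [List.drop_eq_getElem_cons h1, h2]
    calc k.toList ++ ['.'] ++ f.toList.drop (k.length + 1)
        = k.toList ++ ('.' :: f.toList.drop (k.length + 1)) := by simp
      _ = f.toList.take k.length ++ f.toList.drop k.length := by rw [htake, hdrop]
      _ = f.toList := List.take_append_drop _ _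

theorem bScan_skip (f : String) (l : List (String × String)) (is1 is2 : List Int)
    (h : ∀ i ∈ is1, ¬ (PySem.Str.pyGet? f i = some '.') ∨
         List.lookup (PySem.Str.slice f none (some i)) l = none) :
    bScan f l (is1 ++ is2) = bScan f l is2 := by
  induction is1 with
  | nil => rfl
  | cons i is ih =>
    rw [List.cons_append]
    have hrest : ∀ j ∈ is, ¬ (PySem.Str.pyGet? f j = some '.') ∨
        List.lookup (PySem.Str.slice f none (some j)) l = none :=
      fun j hj => h j (List.mem_cons_of_mem _ hj)
    rcases h i (by simp) with hne | hnone
    · have hb : (PySem.Str.pyGet? f i == some '.') = false := beq_eq_false_iff_ne.mpr hne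
      simp only [bScan, hb, Bool.false_eq_true, if_false]
      exact ih hrest
    · simp only [bScan, hnone, ite_self]
      exact ih hrest

theorem slice_toList (f : String) (j : Nat) :
    (PySem.Str.slice f none (some (j : Int))).toList = f.toList.take j := by
  simp [PySem.Str.toList_slice, PySem.Chars.slice_eq_listSlice, PySem.List.slice_to_natCast]

-- when a dot-prefix lookup hits, it names an entry at least as long as A's best
set_option maxHeartbeats 2000000 in
theorem skip_of_bound {f : String} {l : List (String × String)} {k : String}
    (hbound : ∀ kv ∈ l, (kv.1.toList ++ ['.']).isPrefixOf f.toList → kv.1.length ≤ k.length)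
    {j : Nat} (hjN : j < f.toList.length) (hjm : k.length < j) :
    ¬ (PySem.Str.pyGet? f (j : Int) = some '.') ∨
    List.lookup (PySem.Str.slice f none (some (j : Int))) l = none := by
  by_cases hdot : PySem.Str.pyGet? f (j : Int) = some '.'
  · right
    generalize hpdef : PySem.Str.slice f none (some (j : Int)) = p
    have hpL : p.toList = f.toList.take j := by rw [← hpdef]; exact slice_toList f j
    cases hv : List.lookup p l with
    | none => rfl
    | some v' =>
      exfalso
      have hplen : p.length = j := by
        rw [← String.length_toList, hpL, List.length_take]
        omega
      have hmem := lookup_mem hv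
      have hgetj : f.toList[j]? = some '.' := by
        rw [← PySem.Str.pyGet?_natCast]
        exact hdot
      have hpre' : (p.toList ++ ['.']).isPrefixOf f.toList := by
        rw [matches_iff]
        refine ⟨?_, ?_⟩
        · rw [hplen, hpL]
        · rw [hplen]; exact hgetj
      have hle : p.length ≤ k.length := hbound _ hmem hpre'
      omega
  · left; exact hdot

-- ===== VERDICT (by name: the statement is the Claim_ definition above) =====
set_option maxHeartbeats 2000000 in
theorem find_parent_unwind_py_spec : Claim_equal_find_parent_unwind_py := by
  intro f l _
  unfold Spec_find_parent_unwind_py find_parent_unwind_py find_parent_unwind_py_alt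
  simp only []
  rw [step_eq f, foldA_eq f l none none (-1)]
  have hNlen : f.toList.length = f.length := String.length_toList
  have hlenf : PySem.Str.len f = (f.length : Int) := by simp [PySem.Str.len_eq]
  have hidx : (PySem.List.pyRange 0 (PySem.Str.len f) 1).reverse
      = ((List.range f.length).reverse).map (fun (j : Nat) => (j : Int)) := by
    rw [hlenf, PySem.List.pyRange_one, ← List.map_reverse]
    have h0 : ((f.length : Int) - 0).toNat = f.length := by omega
    rw [h0]
    refine List.map_congr_left ?_
    intro a _
    omega
  rw [hidx]
  cases hp : pickA f (-1) l with
  | none =>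
    have hskip : ∀ i ∈ ((List.range f.length).reverse).map (fun (j : Nat) => (j : Int)),
        ¬ (PySem.Str.pyGet? f i = some '.') ∨
        List.lookup (PySem.Str.slice f none (some i)) l = none := by
      intro i hi
      simp only [List.mem_map, List.mem_reverse, List.mem_range] at hi
      obtain ⟨j, hjN, rfl⟩ := hi
      by_cases hdot : PySem.Str.pyGet? f (j : Int) = some '.'
      · right
        generalize hpdef : PySem.Str.slice f none (some (j : Int)) = p
        have hpL : p.toList = f.toList.take j := by rw [← hpdef]; exact slice_toList f j
        cases hv : List.lookup p l with
        | none => rfl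
        | some v' =>
          exfalso
          have hplen : p.length = j := by
            rw [← String.length_toList, hpL, List.length_take]
            omega
          have hmem := lookup_mem hv
          have hgetj : f.toList[j]? = some '.' := by
            rw [← PySem.Str.pyGet?_natCast]; exact hdot
          have hpre' : (p.toList ++ ['.']).isPrefixOf f.toList := by
            rw [matches_iff]
            exact ⟨by rw [hplen, hpL], by rw [hplen]; exact hgetj⟩
          have hle : ((p.length : Nat) : Int) ≤ -1 := pickA_none hp _ hmem hpre'
          omega
      · left; exact hdot
    have hb := bScan_skip f l (((List.range f.length).reverse).map (fun (j : Nat) => (j : Int))) [] hskip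
    rw [List.append_nil] at hb
    rw [hb]
    rfl
  | some kv =>
    obtain ⟨k, v⟩ := kv
    obtain ⟨hpre, _, hbound, hlook⟩ := pickA_some hp
    obtain ⟨htake, hget⟩ := (matches_iff f k).mp hpre
    have hmN : k.length < f.toList.length := (List.getElem?_eq_some_iff.mp hget).1
    have hdecomp : ((List.range f.length).reverse).map (fun (j : Nat) => (j : Int))
        = (((List.range (f.length - (k.length + 1))).map (fun j => (k.length + 1) + j)).reverse).map (fun (j : Nat) => (j : Int))
          ++ (((k.length : Nat) : Int) :: ((List.range k.length).reverse).map (fun (j : Nat) => (j : Int))) := by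
      have hN : f.length = (k.length + 1) + (f.length - (k.length + 1)) := by omega
      conv_lhs => rw [hN]
      rw [List.range_add, List.reverse_append, List.map_append]
      congr 1
      rw [List.range_succ, List.reverse_append]
      simp
    rw [hdecomp]
    rw [bScan_skip f l _ _ ?hskip]
    case hskip =>
      intro i hi
      simp only [List.mem_map, List.mem_reverse, List.mem_range] at hi
      obtain ⟨j, hjt, rfl⟩ := hi
      exact skip_of_bound hbound (by omega) (by omega)
    have hbm : PySem.Str.pyGet? f ((k.length : Nat) : Int) = some '.' := by
      rw [PySem.Str.pyGet?_natCast]; exact hget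
    have hparent : PySem.Str.slice f none (some ((k.length : Nat) : Int)) = k := by
      apply String.toList_inj.mp
      rw [slice_toList, htake]
    simp only [bScan, hbm, beq_self_eq_true, if_true, hparent, hlook]
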